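-- pv_equiv track=rewrite | github.com/tonko2/AtCoder | ahc/008/A_3.py | animal_movement
-- ===== SOURCE A (Python) =====
-- dx = [1, 0, -1, 0, 0]
--
-- dy = [0, 1, 0, -1, 0]
--
-- basic_patterns = ['R', 'D', 'L', 'U', '.']
--
-- def animal_movement(x, y, patterns):
--     nx = x
--     ny = y
--     for pattern in patterns:
--         index = basic_patterns.index(pattern)
--         nx += dx[index]
--         ny += dy[index]
--     return (nx, ny)
-- ===== SOURCE B (Python) =====
-- basic_patterns = ['R', 'D', 'L', 'U', '.']
--
-- def animal_movement(x, y, patterns):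
--     for p in patterns:
--         if p not in basic_patterns:
--             raise ValueError(f"{p!r} is not in list")
--     return (x + patterns.count('R') - patterns.count('L'),
--             y + patterns.count('D') - patterns.count('U'))
-- ===== Notes on version B (the rewrite author's own statement) =====
-- stated objective: idiomatic
-- what changed: Replaces the per-move index/delta-table accumulation loop with a validation pass plus a closed form from four list.count calls (x + #R - #L, y + #D - #U).
import Mathlib
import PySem

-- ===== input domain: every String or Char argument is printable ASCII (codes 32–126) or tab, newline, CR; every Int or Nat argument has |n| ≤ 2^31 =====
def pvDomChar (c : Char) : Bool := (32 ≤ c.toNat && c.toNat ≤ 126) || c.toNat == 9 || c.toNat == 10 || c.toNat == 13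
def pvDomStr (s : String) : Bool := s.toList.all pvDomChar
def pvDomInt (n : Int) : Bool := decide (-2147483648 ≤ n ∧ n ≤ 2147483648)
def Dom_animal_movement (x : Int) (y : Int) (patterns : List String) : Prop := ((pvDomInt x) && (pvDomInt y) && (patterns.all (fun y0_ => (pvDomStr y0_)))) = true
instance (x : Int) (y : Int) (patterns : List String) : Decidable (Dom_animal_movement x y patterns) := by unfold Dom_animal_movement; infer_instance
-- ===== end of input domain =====

-- B replaces A's per-move index/delta-table loop with a validation pass plus a
-- closed form built from four list counts (idiomatic; same cost).
-- ===== PORT A =====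
def pv_dx : List Int := [1, 0, -1, 0, 0]
def pv_dy : List Int := [0, 1, 0, -1, 0]
def pv_basic_patterns : List String := ["R", "D", "L", "U", "."]

-- basic_patterns.index(pattern) raises ValueError on an unknown pattern (index? = none);
-- those inputs are outside Pre_, the 'none' branch leaves the state unchanged.
def animal_movement (x : Int) (y : Int) (patterns : List String) : Int × Int :=
  patterns.foldl (fun s pattern =>
    match PySem.List.index? pv_basic_patterns pattern with
    | some index => (s.1 + (PySem.List.pyGet? pv_dx (index : Int)).getD 0,
                     s.2 + (PySem.List.pyGet? pv_dy (index : Int)).getD 0)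
    | none => s) (x, y)

-- ===== PORT B =====
-- Source B raises ValueError on an invalid pattern; outside Pre_, modelled by returning (x, y).
def animal_movement_alt (x : Int) (y : Int) (patterns : List String) : Int × Int :=
  if patterns.any (fun p => !(pv_basic_patterns.contains p)) then (x, y)
  else (x + (PySem.List.count patterns "R" : Int) - (PySem.List.count patterns "L" : Int),
        y + (PySem.List.count patterns "D" : Int) - (PySem.List.count patterns "U" : Int))

-- ===== PRECONDITION & SPEC =====
-- Pre_ excludes exactly the inputs where A raises ValueError: a pattern not in basic_patterns.
def Pre_animal_movement (x : Int) (y : Int) (patterns : List String) : Prop :=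
  ∀ p ∈ patterns, p ∈ pv_basic_patterns
instance (x : Int) (y : Int) (patterns : List String) : Decidable (Pre_animal_movement x y patterns) := by unfold Pre_animal_movement; infer_instance
def pvWitness_animal_movement : Int × Int × List String := (2, -3, ["R", "R", "D", ".", "U", "L"])

def Spec_animal_movement (x : Int) (y : Int) (patterns : List String) (out : Int × Int) : Prop := out = animal_movement_alt x y patterns
instance (x : Int) (y : Int) (patterns : List String) (out : Int × Int) : Decidable (Spec_animal_movement x y patterns out) := by unfold Spec_animal_movement; infer_instance

-- ===== CLAIM (what is proved, stated in full; the proofs are below) =====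
def Claim_equal_animal_movement : Prop := ∀ (x : Int) (y : Int) (patterns : List String), Dom_animal_movement x y patterns → Pre_animal_movement x y patterns → Spec_animal_movement x y patterns (animal_movement x y patterns)

-- ===== LEMMAS AND PROOFS =====
theorem pv_loop_closed (patterns : List String) (x y : Int)
    (h : ∀ p ∈ patterns, p ∈ pv_basic_patterns) :
    patterns.foldl (fun s pattern =>
      match PySem.List.index? pv_basic_patterns pattern with
      | some index => (s.1 + (PySem.List.pyGet? pv_dx (index : Int)).getD 0,
                       s.2 + (PySem.List.pyGet? pv_dy (index : Int)).getD 0)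
      | none => s) (x, y)
    = (x + (PySem.List.count patterns "R" : Int) - (PySem.List.count patterns "L" : Int),
       y + (PySem.List.count patterns "D" : Int) - (PySem.List.count patterns "U" : Int)) := by
  induction patterns generalizing x y with
  | nil => simp [PySem.List.count]
  | cons p ps ih =>
    have hp : p ∈ pv_basic_patterns := h p (List.mem_cons_self ..)
    have hps : ∀ q ∈ ps, q ∈ pv_basic_patterns := fun q hq => h q (List.mem_cons_of_mem _ hq)
    simp only [List.foldl_cons]
    fin_cases hp <;>
      exact (ih _ _ hps).trans (by
        simp [PySem.List.count, pv_dx, pv_dy, PySem.List.pyGet?, PySem.List.pyIdx?]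
        try push_cast
        try ring)

-- ===== VERDICT (by name: the statement is the Claim_ definition above) =====
theorem animal_movement_spec : Claim_equal_animal_movement := by
  intro x y patterns _ hpre
  unfold Spec_animal_movement animal_movement animal_movement_alt
  have hno : patterns.any (fun p => !(pv_basic_patterns.contains p)) = false := by
    simp only [List.any_eq_false, Bool.not_eq_true', List.contains_eq_mem, decide_eq_false_iff_not,
      not_not]
    exact hpre
  rw [hno, if_neg (by simp)]
  exact pv_loop_closed patterns x y hpre
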